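-- pv_equiv track=rewrite | github.com/sheraankit2112/Crud-Application-Django | my/forms.py | contain
-- ===== SOURCE A (Python) =====
-- def contain(string,list):
--     result=True
--     l=[i for i in string]
--     for j in l:
--         if j in list:
--             result=False
--             break
--         else:
--             pass
--     return result
-- ===== SOURCE B (Python) =====
-- def contain(string, list):
--     # Scan the LIST instead of the string: a char of string lies in list
--     # exactly when some list element is a single character occurring in string.
--     for x in list:
--         if len(x) == 1 and x in string:
--             return False
--     return True
-- ===== Notes on version B (the rewrite author's own statement) =====
-- stated objective: alternative
-- what changed: Reverses the traversal: instead of looping over the string's characters and testing each against the list, B loops over the list once and returns False on the first element that is a single character occurring in the string.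
import Mathlib
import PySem

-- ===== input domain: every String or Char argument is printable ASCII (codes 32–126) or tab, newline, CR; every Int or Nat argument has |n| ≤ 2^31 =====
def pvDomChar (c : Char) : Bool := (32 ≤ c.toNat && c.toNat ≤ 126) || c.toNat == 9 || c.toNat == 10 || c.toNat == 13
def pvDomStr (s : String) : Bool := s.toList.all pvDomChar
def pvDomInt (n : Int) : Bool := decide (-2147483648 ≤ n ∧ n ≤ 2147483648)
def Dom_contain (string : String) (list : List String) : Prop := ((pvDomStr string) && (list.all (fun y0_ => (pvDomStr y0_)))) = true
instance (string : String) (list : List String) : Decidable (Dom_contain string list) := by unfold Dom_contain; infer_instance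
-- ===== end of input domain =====

-- B reverses the traversal: it scans the LIST once, returning False on the first single-character element occurring in the string (alternative decomposition, same cost).


-- ===== PORT A =====
-- the for-loop: result starts True; on the first j ∈ list the loop breaks returning False
def containGo (list : List String) (result : Bool) : List String → Bool
  | [] => result
  | j :: rest => if list.contains j then false else containGo list result rest

def contain (string : String) (list : List String) : Bool :=
  containGo list true (string.toList.map (fun i => String.ofList [i]))

-- ===== PORT B =====
-- the for-loop over list: return False on the first x with len(x) == 1 and x in string
def containAltGo (string : String) : List String → Bool
  | [] => true
  | x :: rest =>
      if PySem.Str.len x == 1 && PySem.Str.isIn x string then false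
      else containAltGo string rest

def contain_alt (string : String) (list : List String) : Bool :=
  containAltGo string list

-- ===== PRECONDITION & SPEC =====
def Spec_contain (string : String) (list : List String) (out : Bool) : Prop := out = contain_alt string list
instance (string : String) (list : List String) (out : Bool) : Decidable (Spec_contain string list out) := by unfold Spec_contain; infer_instance

-- ===== CLAIM (what is proved, stated in full; the proofs are below) =====
def Claim_equal_contain : Prop := ∀ (string : String) (list : List String), Dom_contain string list → Spec_contain string list (contain string list)

-- ===== LEMMAS AND PROOFS =====
theorem containGo_true_iff (list l : List String) :
    containGo list true l = true ↔ ∀ j ∈ l, j ∉ list := by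
  induction l with
  | nil => simp [containGo]
  | cons j rest ih =>
      by_cases h : list.contains j = true
      · simp only [containGo, if_pos h]
        constructor
        · intro hf; exact absurd hf (by simp)
        · intro hall; exact absurd (List.mem_of_elem_eq_true h) (hall j (List.mem_cons_self))
      · simp only [containGo, if_neg h, ih, List.mem_cons]
        constructor
        · rintro hall j' (rfl | hj'); · simpa using h
          · exact hall j' hj'
        · intro hall j' hj'; exact hall j' (Or.inr hj')

theorem containAltGo_true_iff (string : String) (l : List String) :
    containAltGo string l = true ↔
      ∀ x ∈ l, ¬ (x.toList.length = 1 ∧ x.toList <:+: string.toList) := by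
  induction l with
  | nil => simp [containAltGo]
  | cons x rest ih =>
      by_cases h : (PySem.Str.len x == 1 && PySem.Str.isIn x string) = true
      · simp only [containAltGo, if_pos h]
        have h' : x.toList.length = 1 ∧ x.toList <:+: string.toList := by
          simp only [Bool.and_eq_true, beq_iff_eq, PySem.Str.len_eq,
            PySem.Str.isIn_iff_infix] at h
          exact ⟨by omega, h.2⟩
        constructor
        · intro hf; exact absurd hf (by simp)
        · intro hall; exact absurd h' (hall x List.mem_cons_self)
      · simp only [containAltGo, if_neg h, ih, List.mem_cons]
        have h' : ¬ (x.toList.length = 1 ∧ x.toList <:+: string.toList) := by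
          simp only [Bool.and_eq_true, beq_iff_eq, PySem.Str.len_eq,
            PySem.Str.isIn_iff_infix, not_and] at h ⊢
          intro hlen hinf
          exact h (by omega) hinf
        constructor
        · intro hall x' hx'
          rcases hx' with h1 | h2
          · rw [h1]; exact h'
          · exact hall x' h2
        · intro hall x' hx'; exact hall x' (Or.inr hx')

theorem contain_eq (string : String) (list : List String) :
    contain string list = contain_alt string list := by
  unfold contain contain_alt
  rw [Bool.eq_iff_iff, containGo_true_iff, containAltGo_true_iff]
  constructor
  · rintro h x hx ⟨hlen, hinf⟩
    obtain ⟨c, hc⟩ : ∃ c, x.toList = [c] := List.length_eq_one_iff.mp hlen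
    rw [hc, List.singleton_infix_iff] at hinf
    have hxeq : x = String.ofList [c] := by
      have := congrArg String.ofList hc
      simpa using this
    refine h x ?_ hx
    rw [hxeq]
    exact List.mem_map.mpr ⟨c, hinf, rfl⟩
  · intro h j hj hjl
    obtain ⟨c, hc, rfl⟩ := List.mem_map.mp hj
    refine h _ hjl ⟨by simp, ?_⟩
    simpa [List.singleton_infix_iff] using hc

-- ===== VERDICT (by name: the statement is the Claim_ definition above) =====
theorem contain_spec : Claim_equal_contain := by
  intro string list _
  unfold Spec_contain
  exact contain_eq string list
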